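-- pv_equiv track=rewrite | github.com/fmfg03/uvacsarch | generate_pages.py | get_field_relevance
-- ===== SOURCE A (Python) =====
-- FIELD_RELEVANCE = {
--     'algorithms': 'Algorithm research continues to be a foundational aspect of computer science, with applications spanning from basic data structures to complex computational systems.',
--     'ai': 'Artificial intelligence remains a critical area of computer science research, with applications spanning from small-scale systems to enterprise-level frameworks.',
--     'systems': 'Systems research addresses fundamental challenges in computer architecture, networking, and operating systems that enable modern computing infrastructure.',
--     'security': 'Security research tackles increasingly complex threats in our interconnected digital world, developing novel protections for systems, networks, and data.',
--     'data': 'Data-focused research explores innovative methods for processing, analyzing, and extracting insights from increasingly large and complex datasets.',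
--     'default': 'This area of computer science research continues to advance our understanding of computational methods and their applications in solving real-world problems.'
-- }
--
-- def get_field_relevance(title):
--     """Determine field relevance based on title keywords"""
--     if not title:
--         return FIELD_RELEVANCE['default']
--
--     title_lower = title.lower()
--
--     if any(kw in title_lower for kw in ['algorithm', 'computational', 'scalable']):
--         return FIELD_RELEVANCE['algorithms']
--     elif any(kw in title_lower for kw in ['neural', 'learning', 'ai', 'classification', 'deep']):
--         return FIELD_RELEVANCE['ai']
--     elif any(kw in title_lower for kw in ['system', 'architecture', 'network']):
--         return FIELD_RELEVANCE['systems']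
--     elif any(kw in title_lower for kw in ['security', 'privacy', 'authentication']):
--         return FIELD_RELEVANCE['security']
--     elif any(kw in title_lower for kw in ['data', 'e-commerce', 'personalization']):
--         return FIELD_RELEVANCE['data']
--     else:
--         return FIELD_RELEVANCE['default']
-- ===== SOURCE B (Python) =====
-- FIELD_RELEVANCE = {
--     'algorithms': 'Algorithm research continues to be a foundational aspect of computer science, with applications spanning from basic data structures to complex computational systems.',
--     'ai': 'Artificial intelligence remains a critical area of computer science research, with applications spanning from small-scale systems to enterprise-level frameworks.',
--     'systems': 'Systems research addresses fundamental challenges in computer architecture, networking, and operating systems that enable modern computing infrastructure.',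
--     'security': 'Security research tackles increasingly complex threats in our interconnected digital world, developing novel protections for systems, networks, and data.',
--     'data': 'Data-focused research explores innovative methods for processing, analyzing, and extracting insights from increasingly large and complex datasets.',
--     'default': 'This area of computer science research continues to advance our understanding of computational methods and their applications in solving real-world problems.'
-- }
--
-- # Flat keyword->field pairs (no grouping); the priority list alone encodes
-- # which field wins when keywords of several fields occur in the title.
-- KEYWORD_FIELD = [
--     ('algorithm', 'algorithms'), ('computational', 'algorithms'), ('scalable', 'algorithms'),
--     ('neural', 'ai'), ('learning', 'ai'), ('ai', 'ai'), ('classification', 'ai'), ('deep', 'ai'),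
--     ('system', 'systems'), ('architecture', 'systems'), ('network', 'systems'),
--     ('security', 'security'), ('privacy', 'security'), ('authentication', 'security'),
--     ('data', 'data'), ('e-commerce', 'data'), ('personalization', 'data'),
-- ]
--
-- PRIORITY = ['algorithms', 'ai', 'systems', 'security', 'data']
--
-- def get_field_relevance(title):
--     """Determine field relevance based on title keywords"""
--     if not title:
--         return FIELD_RELEVANCE['default']
--     title_lower = title.lower()
--     # Stage 1: exhaustively collect every field any of whose keywords occurs.
--     matched = [field for kw, field in KEYWORD_FIELD if kw in title_lower]
--     # Stage 2: pick the highest-priority matched field.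
--     for field in PRIORITY:
--         if field in matched:
--             return FIELD_RELEVANCE[field]
--     return FIELD_RELEVANCE['default']
-- ===== Notes on version B (the rewrite author's own statement) =====
-- stated objective: alternative
-- what changed: A short-circuits through five if/elif keyword-group branches; B instead runs two staged passes: it first exhaustively collects all matched fields from a flat keyword-to-field pair list, then resolves the winner by a separate priority list.
import Mathlib
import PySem

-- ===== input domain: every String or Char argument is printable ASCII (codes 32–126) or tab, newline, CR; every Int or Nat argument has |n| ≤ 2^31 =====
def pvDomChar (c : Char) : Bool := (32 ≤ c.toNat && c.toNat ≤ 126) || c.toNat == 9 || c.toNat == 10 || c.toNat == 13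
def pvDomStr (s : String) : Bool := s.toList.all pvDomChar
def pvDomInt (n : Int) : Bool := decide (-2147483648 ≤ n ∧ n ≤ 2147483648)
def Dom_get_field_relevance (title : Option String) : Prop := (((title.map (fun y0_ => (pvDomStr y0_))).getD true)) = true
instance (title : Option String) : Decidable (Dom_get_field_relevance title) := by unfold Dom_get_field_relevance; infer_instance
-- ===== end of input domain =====

-- B replaces A's short-circuit if/elif chain with two staged passes: collect all matched
-- fields from a flat keyword->field list, then resolve by a separate priority list (alternative, same cost).

-- ===== PORT A =====
def FIELD_RELEVANCE : PySem.Dict String String := PySem.Dict.ofList [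
  ("algorithms", "Algorithm research continues to be a foundational aspect of computer science, with applications spanning from basic data structures to complex computational systems."),
  ("ai", "Artificial intelligence remains a critical area of computer science research, with applications spanning from small-scale systems to enterprise-level frameworks."),
  ("systems", "Systems research addresses fundamental challenges in computer architecture, networking, and operating systems that enable modern computing infrastructure."),
  ("security", "Security research tackles increasingly complex threats in our interconnected digital world, developing novel protections for systems, networks, and data."),
  ("data", "Data-focused research explores innovative methods for processing, analyzing, and extracting insights from increasingly large and complex datasets."),
  ("default", "This area of computer science research continues to advance our understanding of computational methods and their applications in solving real-world problems.")]

def get_field_relevance (title : Option String) : String :=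
  match title with
  | none => FIELD_RELEVANCE.getD "default" ""
  | some t =>
    if t = "" then FIELD_RELEVANCE.getD "default" ""
    else
      let title_lower := PySem.Str.lower t
      if ["algorithm", "computational", "scalable"].any (fun kw => PySem.Str.isIn kw title_lower) then
        FIELD_RELEVANCE.getD "algorithms" ""
      else if ["neural", "learning", "ai", "classification", "deep"].any (fun kw => PySem.Str.isIn kw title_lower) then
        FIELD_RELEVANCE.getD "ai" ""
      else if ["system", "architecture", "network"].any (fun kw => PySem.Str.isIn kw title_lower) then
        FIELD_RELEVANCE.getD "systems" ""
      else if ["security", "privacy", "authentication"].any (fun kw => PySem.Str.isIn kw title_lower) then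
        FIELD_RELEVANCE.getD "security" ""
      else if ["data", "e-commerce", "personalization"].any (fun kw => PySem.Str.isIn kw title_lower) then
        FIELD_RELEVANCE.getD "data" ""
      else
        FIELD_RELEVANCE.getD "default" ""

-- ===== PORT B =====
def KEYWORD_FIELD : List (String × String) := [
  ("algorithm", "algorithms"), ("computational", "algorithms"), ("scalable", "algorithms"),
  ("neural", "ai"), ("learning", "ai"), ("ai", "ai"), ("classification", "ai"), ("deep", "ai"),
  ("system", "systems"), ("architecture", "systems"), ("network", "systems"),
  ("security", "security"), ("privacy", "security"), ("authentication", "security"),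
  ("data", "data"), ("e-commerce", "data"), ("personalization", "data")]

def PRIORITY : List String := ["algorithms", "ai", "systems", "security", "data"]

def get_field_relevance_alt (title : Option String) : String :=
  match title with
  | none => FIELD_RELEVANCE.getD "default" ""
  | some t =>
    if t = "" then FIELD_RELEVANCE.getD "default" ""
    else
      let title_lower := PySem.Str.lower t
      let matched : List String :=
        (KEYWORD_FIELD.filter (fun p => PySem.Str.isIn p.1 title_lower)).map Prod.snd
      match PRIORITY.find? (fun f => matched.contains f) with
      | some f => FIELD_RELEVANCE.getD f ""
      | none => FIELD_RELEVANCE.getD "default" ""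

-- ===== PRECONDITION & SPEC =====
def Spec_get_field_relevance (title : Option String) (out : String) : Prop := out = get_field_relevance_alt title
instance (title : Option String) (out : String) : Decidable (Spec_get_field_relevance title out) := by unfold Spec_get_field_relevance; infer_instance

-- ===== CLAIM (what is proved, stated in full; the proofs are below) =====
def Claim_equal_get_field_relevance : Prop := ∀ (title : Option String), Dom_get_field_relevance title → Spec_get_field_relevance title (get_field_relevance title)

-- ===== LEMMAS AND PROOFS =====

-- Membership in the mapped filter = some pair passes the filter with that second component.
theorem contains_map_filter (xs : List (String × String)) (p : String × String → Bool) (f : String) :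
    (((xs.filter p).map Prod.snd).contains f) = xs.any (fun x => p x && (f == x.2)) := by
  induction xs with
  | nil => rfl
  | cons a xs ih =>
    cases hp : p a <;>
      simp only [List.filter_cons, hp, List.map_cons, List.contains_cons, List.any_cons, ih,
        Bool.false_and, Bool.false_or, Bool.true_and, Bool.false_eq_true, if_true, if_false]

-- ===== VERDICT (by name: the statement is the Claim_ definition above) =====
theorem get_field_relevance_spec : Claim_equal_get_field_relevance := by
  intro title _
  unfold Spec_get_field_relevance get_field_relevance get_field_relevance_alt
  cases title with
  | none => rfl
  | some t =>
    by_cases h : t = ""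
    · simp [h]
    · simp only [if_neg h,
        contains_map_filter KEYWORD_FIELD (fun p => PySem.Str.isIn p.1 (PySem.Str.lower t))]
      simp only [KEYWORD_FIELD, List.any_cons, List.any_nil]
      split_ifs <;> simp_all [PRIORITY]
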